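-- pv_equiv track=rewrite | github.com/nipun-ghanathe/vocab_flashcards | main.py | get_word_meaning_list
-- ===== SOURCE A (Python) =====
-- def format_word(part: str, word: str) -> str:
--     """Return formatted key for the flashcard."""
--     return f"({part}) {word}"
--
-- def get_word_meaning_list(rows: list[list[str]]) -> list[list[str]]:
--     """Get a grouped 'word -> meaning' list."""
--     # rows.sort()  # Rows must be sorted for grouping
--     grouped_rows: list[list[str]] = []
--     prev_key = ""
--     for word, part, meaning in rows:
--         key = format_word(part, word)
--         if key != prev_key:
--             grouped_rows.append([key, meaning])
--         elif grouped_rows[-1][1].startswith("-"):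
--             grouped_rows[-1][1] += f"\n- {meaning}"
--         else:
--             grouped_rows[-1][1] = f"- {grouped_rows[-1][1]}\n- {meaning}"
--         prev_key = key
--     return grouped_rows
-- ===== SOURCE B (Python) =====
-- def format_word(part: str, word: str) -> str:
--     """Return formatted key for the flashcard."""
--     return f"({part}) {word}"
--
--
-- def get_word_meaning_list(rows: list[list[str]]) -> list[list[str]]:
--     """Get a grouped 'word -> meaning' list (staged: keys, boundary indices, slices)."""
--     keys = [format_word(part, word) for word, part, meaning in rows]
--     starts = [i for i in range(len(rows)) if i == 0 or keys[i] != keys[i - 1]]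
--     bounds = list(zip(starts, starts[1:] + [len(rows)]))
--     out: list[list[str]] = []
--     for lo, hi in bounds:
--         meanings = [row[2] for row in rows[lo:hi]]
--         if hi - lo == 1:
--             out.append([keys[lo], meanings[0]])
--         else:
--             head = meanings[0] if meanings[0].startswith("-") else "- " + meanings[0]
--             out.append([keys[lo], head + "".join("\n- " + m for m in meanings[1:])])
--     return out
-- ===== Notes on version B (the rewrite author's own statement) =====
-- stated objective: alternative
-- what changed: B replaces A's stateful merge loop (append then mutate the last entry's meaning string) with a staged index pipeline: compute the key list, compute the boundary indices where the key changes, pair them into (lo,hi) bounds, and format each slice rows[lo:hi] independently.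
import Mathlib
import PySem

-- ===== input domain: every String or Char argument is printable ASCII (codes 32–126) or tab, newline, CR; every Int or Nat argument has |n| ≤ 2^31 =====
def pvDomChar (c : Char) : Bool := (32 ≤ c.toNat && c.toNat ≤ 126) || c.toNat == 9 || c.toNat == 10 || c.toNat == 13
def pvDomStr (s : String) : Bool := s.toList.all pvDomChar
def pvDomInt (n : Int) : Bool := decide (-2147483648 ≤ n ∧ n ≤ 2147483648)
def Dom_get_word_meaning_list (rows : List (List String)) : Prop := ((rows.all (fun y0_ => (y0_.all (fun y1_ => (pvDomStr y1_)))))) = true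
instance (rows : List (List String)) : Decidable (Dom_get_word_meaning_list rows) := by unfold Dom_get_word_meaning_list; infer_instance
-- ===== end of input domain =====

-- B replaces A's stateful merge loop with a staged index pipeline (keys, boundary
-- indices, bounds, slice-and-format); objective: alternative decomposition, same cost.

-- Python string concatenation (f-strings / '+'), kept on the kernel-transparent List Char side.
def pvCat (a b : String) : String := String.ofList (a.toList ++ b.toList)

-- ===== PORT A =====
def format_word (part word : String) : String :=
  String.ofList ('(' :: part.toList ++ ')' :: ' ' :: word.toList)  -- f"({part}) {word}"

def pvA_loop : List (List String) → List (List String) → String → List (List String)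
  | [], grouped, _ => grouped
  | row :: rest, grouped, prev_key =>
    match row with
    | [word, part, meaning] =>
      let key := format_word part word
      if key ≠ prev_key then
        pvA_loop rest (grouped ++ [[key, meaning]]) key
      else if PySem.Str.startswith (PySem.List.pyGetD (PySem.List.pyGetD grouped (-1) []) 1 "") "-" then
        -- grouped_rows[-1][1] += f"\n- {meaning}"
        pvA_loop rest (PySem.List.pySetD grouped (-1)
          (PySem.List.pySetD (PySem.List.pyGetD grouped (-1) []) 1
            (pvCat (PySem.List.pyGetD (PySem.List.pyGetD grouped (-1) []) 1 "") (pvCat "\n- " meaning)))) key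
      else
        -- grouped_rows[-1][1] = f"- {grouped_rows[-1][1]}\n- {meaning}"
        pvA_loop rest (PySem.List.pySetD grouped (-1)
          (PySem.List.pySetD (PySem.List.pyGetD grouped (-1) []) 1
            (pvCat "- " (pvCat (PySem.List.pyGetD (PySem.List.pyGetD grouped (-1) []) 1 "") (pvCat "\n- " meaning))))) key
    | _ => pvA_loop rest grouped prev_key  -- Python raises ValueError here; excluded by Pre_

def get_word_meaning_list (rows : List (List String)) : List (List String) :=
  pvA_loop rows [] ""

-- ===== PORT B =====
-- key of one unpacked row (ValueError on non-triples is excluded by Pre_)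
def pvRowKey : List String → String
  | [w, p, _m] => format_word p w
  | _ => format_word "" ""

-- starts = [i for i in range(len(rows)) if i == 0 or keys[i] != keys[i-1]]
def pvStarts (keys : List String) : List Nat :=
  (List.range keys.length).filter (fun i => i == 0 || keys.getD i "" != keys.getD (i - 1) "")

-- one loop body: format the group rows[lo:hi]
def pvGroupRow (keys : List String) (rows : List (List String)) (b : Nat × Nat) : List String :=
  let meanings := ((rows.drop b.1).take (b.2 - b.1)).map (fun row => PySem.List.pyGetD row 2 "")
  if b.2 - b.1 == 1 then [keys.getD b.1 "", meanings.getD 0 ""]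
  else
    let m0 := meanings.getD 0 ""
    let head := if PySem.Str.startswith m0 "-" then m0 else pvCat "- " m0
    [keys.getD b.1 "",
     pvCat head (PySem.Str.join "" ((meanings.drop 1).map (fun m => pvCat "\n- " m)))]

def get_word_meaning_list_alt (rows : List (List String)) : List (List String) :=
  let keys := rows.map pvRowKey
  let starts := pvStarts keys
  let bounds := starts.zip (starts.tail ++ [rows.length])
  bounds.map (pvGroupRow keys rows)

-- ===== PRECONDITION & SPEC =====
-- Pre_ excludes rows that are not 3-element lists: Python's 'for word, part, meaning in rows' raises ValueError there.
def Pre_get_word_meaning_list (rows : List (List String)) : Prop :=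
  ∀ r ∈ rows, r.length = 3
instance (rows : List (List String)) : Decidable (Pre_get_word_meaning_list rows) := by
  unfold Pre_get_word_meaning_list; infer_instance

def pvWitness_get_word_meaning_list : List (List String) :=
  [["wind", "n", "moving air"], ["wind", "n", "a turn"], ["well", "adv", "good"]]

def Spec_get_word_meaning_list (rows : List (List String)) (out : List (List String)) : Prop := out = get_word_meaning_list_alt rows
instance (rows : List (List String)) (out : List (List String)) : Decidable (Spec_get_word_meaning_list rows out) := by unfold Spec_get_word_meaning_list; infer_instance

-- ===== CLAIM (what is proved, stated in full; the proofs are below) =====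
def Claim_equal_get_word_meaning_list : Prop := ∀ (rows : List (List String)), Dom_get_word_meaning_list rows → Pre_get_word_meaning_list rows → Spec_get_word_meaning_list rows (get_word_meaning_list rows)

-- ===== LEMMAS AND PROOFS =====

-- proof-side canonical form: recursion on maximal runs of equal keys
def pvMeaning (r : List String) : String := PySem.List.pyGetD r 2 ""

def pvRun (k : String) : List (List String) → List String × List (List String)
  | [] => ([], [])
  | r :: rest =>
    if pvRowKey r = k then
      let p := pvRun k rest
      (pvMeaning r :: p.1, p.2)
    else ([], r :: rest)

theorem pvRun_len (k : String) (rows : List (List String)) :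
    (pvRun k rows).2.length ≤ rows.length := by
  induction rows with
  | nil => simp [pvRun]
  | cons r rest ih =>
    by_cases h : pvRowKey r = k <;> simp [pvRun, h]
    exact Nat.le_succ_of_le ih

def pvFmt (k first : String) (rest : List String) : List String :=
  if rest = [] then [k, first]
  else
    [k, pvCat (if PySem.Str.startswith first "-" then first else pvCat "- " first)
              (PySem.Str.join "" (rest.map (fun m => pvCat "\n- " m)))]

def pvGrp : List (List String) → List (List String)
  | [] => []
  | r :: rest =>
    let p := pvRun (pvRowKey r) rest
    pvFmt (pvRowKey r) (pvMeaning r) p.1 :: pvGrp p.2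
termination_by rows => rows.length
decreasing_by exact Nat.lt_succ_of_le (pvRun_len _ _)

-- A's per-meaning extension step (the two mutating branches of A's loop)
def pvStep (cur m : String) : String :=
  if PySem.Str.startswith cur "-" then pvCat cur (pvCat "\n- " m)
  else pvCat "- " (pvCat cur (pvCat "\n- " m))

theorem pvCat_assoc (a b c : String) : pvCat (pvCat a b) c = pvCat a (pvCat b c) := by
  simp [pvCat]

theorem sw_pvCat (a b : String) (h : PySem.Str.startswith a "-" = true) :
    PySem.Str.startswith (pvCat a b) "-" = true := by
  rw [PySem.Str.startswith_eq] at h ⊢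
  rw [PySem.Chars.startswith_iff] at h ⊢
  simp [pvCat]
  exact h.trans (List.prefix_append _ _)

theorem sw_dash (b : String) : PySem.Str.startswith (pvCat "- " b) "-" = true := by
  rw [PySem.Str.startswith_eq, PySem.Chars.startswith_iff]
  simp [pvCat]

theorem sw_pvStep (cur m : String) : PySem.Str.startswith (pvStep cur m) "-" = true := by
  unfold pvStep
  split
  · exact sw_pvCat _ _ (by assumption)
  · exact sw_dash _

theorem join_empty_cons (a : String) (l : List String) :
    PySem.Str.join "" (a :: l) = pvCat a (PySem.Str.join "" l) := by
  have h : (PySem.Str.join "" (a :: l)).toList = (pvCat a (PySem.Str.join "" l)).toList := by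
    cases l with
    | nil => simp [pvCat, PySem.Chars.join, List.intercalate]
    | cons b l => simp [pvCat, PySem.Chars.join_cons_cons]
  have h2 := congrArg String.ofList h
  rwa [String.ofList_toList, String.ofList_toList] at h2

-- a string already starting with '-' just accumulates the "\n- m" tags
theorem foldl_pvStep_of_sw (ms : List String) :
    ∀ cur, PySem.Str.startswith cur "-" = true →
    ms.foldl pvStep cur = pvCat cur (PySem.Str.join "" (ms.map (fun m => pvCat "\n- " m))) := by
  induction ms with
  | nil =>
    intro cur _
    have h : (cur : String).toList = (pvCat cur (PySem.Str.join "" [])).toList := by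
      simp [pvCat, PySem.Chars.join, List.intercalate]
    have h2 := congrArg String.ofList h
    rwa [String.ofList_toList, String.ofList_toList] at h2
  | cons m ms ih =>
    intro cur h
    have hstep : pvStep cur m = pvCat cur (pvCat "\n- " m) := by
      unfold pvStep; rw [if_pos h]
    rw [List.foldl_cons, ih _ (by rw [hstep]; exact sw_pvCat _ _ h), hstep,
        List.map_cons, join_empty_cons, pvCat_assoc]

theorem pvFmt_eq_foldl (k first : String) (rest : List String) :
    pvFmt k first rest = [k, rest.foldl pvStep first] := by
  cases rest with
  | nil => simp [pvFmt]
  | cons m ms =>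
    have hstep : pvStep first m =
        pvCat (if PySem.Str.startswith first "-" then first else pvCat "- " first)
              (pvCat "\n- " m) := by
      by_cases h : PySem.Str.startswith first "-" = true
      · unfold pvStep; rw [if_pos h, if_pos h]
      · unfold pvStep; rw [if_neg h, if_neg h, pvCat_assoc]
    rw [List.foldl_cons, foldl_pvStep_of_sw ms (pvStep first m) (sw_pvStep _ _), hstep,
        pvFmt, if_neg (by simp), List.map_cons, join_empty_cons, ← pvCat_assoc]

theorem pySetD_last {α : Type} (xs : List α) (x v : α) :
    PySem.List.pySetD (xs ++ [x]) (-1) v = xs ++ [v] := by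
  simp [PySem.List.pySetD, PySem.List.pySet?, PySem.List.pyIdx?]

theorem pvRowKey_triple (w p m : String) : pvRowKey [w, p, m] = format_word p w := rfl
theorem pvMeaning_triple (w p m : String) : pvMeaning [w, p, m] = m := rfl

-- main invariant: with the last group [k, cur] open, A's loop finishes that group with
-- the leading run of key-k meanings and then produces the groups of the remainder
theorem pvA_loop_inv (rows : List (List String)) :
    ∀ done k cur, (∀ r ∈ rows, r.length = 3) →
    pvA_loop rows (done ++ [[k, cur]]) k =
      done ++ [k, (pvRun k rows).1.foldl pvStep cur] :: pvGrp (pvRun k rows).2 := by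
  induction rows with
  | nil => intro done k cur _; simp [pvA_loop, pvRun, pvGrp]
  | cons r rest ih =>
    intro done k cur h3
    obtain ⟨w, p, m, rfl⟩ : ∃ w p m, r = [w, p, m] := by
      have := h3 r (by simp)
      match r with
      | [w, p, m] => exact ⟨w, p, m, rfl⟩
    have hrest : ∀ r ∈ rest, r.length = 3 := fun r hr => h3 r (by simp [hr])
    by_cases hk : format_word p w = k
    · -- same key: A mutates the last entry, the run extends
      have hget : PySem.List.pyGetD (done ++ [[k, cur]]) (-1) ([] : List String) = [k, cur] :=
        PySem.List.pyGetD_neg_one_append_singleton _ _ _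
      have hget1 : PySem.List.pyGetD ([k, cur] : List String) (1 : Int) "" = cur := rfl
      have hset : ∀ v : String, PySem.List.pySetD ([k, cur] : List String) (1 : Int) v = [k, v] :=
        fun _ => rfl
      have hrun : pvRun k ([w, p, m] :: rest) = (m :: (pvRun k rest).1, (pvRun k rest).2) := by
        simp [pvRun, pvRowKey_triple, pvMeaning_triple, hk]
      rw [pvA_loop]
      simp only [hk, ne_eq, not_true_eq_false, if_false, hget, hget1, hset, pySetD_last, hrun,
        List.foldl_cons]
      by_cases hsw : PySem.Str.startswith cur "-" = true
      · have hps : pvStep cur m = pvCat cur (pvCat "\n- " m) := by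
          unfold pvStep; rw [if_pos hsw]
        rw [if_pos hsw, ← hps, ih _ _ _ hrest]
      · have hps : pvStep cur m = pvCat "- " (pvCat cur (pvCat "\n- " m)) := by
          unfold pvStep; rw [if_neg hsw]
        rw [if_neg hsw, ← hps, ih _ _ _ hrest]
    · -- new key: A closes the group and opens a fresh one
      have hrun : pvRun k ([w, p, m] :: rest) = ([], [w, p, m] :: rest) := by
        simp [pvRun, pvRowKey_triple, hk]
      rw [pvA_loop]
      simp only [hk, ne_eq, not_false_eq_true, if_true, hrun]
      rw [ih (done ++ [[k, cur]]) (format_word p w) m hrest]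
      rw [pvGrp]
      simp [pvRowKey_triple, pvMeaning_triple, pvFmt_eq_foldl]

theorem format_word_ne_empty (p w : String) : format_word p w ≠ "" := by
  intro h
  have := congrArg String.toList h
  simp [format_word] at this

theorem A_eq_pvGrp (rows : List (List String)) (hpre : ∀ r ∈ rows, r.length = 3) :
    get_word_meaning_list rows = pvGrp rows := by
  unfold get_word_meaning_list
  cases rows with
  | nil => simp [pvA_loop, pvGrp]
  | cons r rest =>
    obtain ⟨w, p, m, rfl⟩ : ∃ w p m, r = [w, p, m] := by
      have := hpre r (by simp)
      match r with
      | [w, p, m] => exact ⟨w, p, m, rfl⟩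
    have hrest : ∀ r ∈ rest, r.length = 3 := fun r hr => hpre r (by simp [hr])
    have hinv := pvA_loop_inv rest [] (format_word p w) m hrest
    simp only [List.nil_append] at hinv
    rw [pvA_loop]
    simp only [ne_eq, format_word_ne_empty, not_false_eq_true, if_true, List.nil_append]
    rw [hinv, pvGrp]
    simp [pvRowKey_triple, pvMeaning_triple, pvFmt_eq_foldl]

-- ---- B-side: the index pipeline computes the run recursion ----

-- adjacent-change indices of (k :: ks) counted from the second element
def pvAdj (k : String) (ks : List String) : List Nat :=
  (List.range ks.length).filter (fun i => ks.getD i "" != (k :: ks).getD i "")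

theorem pvStarts_cons (k : String) (ks : List String) :
    pvStarts (k :: ks) = 0 :: (pvAdj k ks).map (· + 1) := by
  unfold pvStarts pvAdj
  rw [List.length_cons, List.range_succ_eq_map, List.filter_cons]
  simp only [beq_self_eq_true, Bool.true_or, if_pos]
  rw [List.filter_map]
  congr 1

theorem pvAdj_cons (k k' : String) (ks : List String) :
    pvAdj k (k' :: ks) =
      (if (k' != k) = true then [0] else []) ++ (pvAdj k' ks).map (· + 1) := by
  have hc : ((k' :: ks).getD 0 "" != (k :: k' :: ks).getD 0 "") = (k' != k) := by
    simp
  by_cases h : (k' != k) = true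
  · rw [if_pos h]
    unfold pvAdj
    rw [List.length_cons, List.range_succ_eq_map, List.filter_cons, List.filter_map,
        if_pos (show _ = true by rw [hc]; exact h), List.singleton_append]
    congr 1
  · rw [if_neg h]
    unfold pvAdj
    rw [List.length_cons, List.range_succ_eq_map, List.filter_cons, List.filter_map,
        if_neg (show ¬ _ = true by rw [hc]; exact h), List.nil_append]
    congr 1

theorem pvAdj_run (k : String) (rest : List (List String)) :
    pvAdj k (rest.map pvRowKey) =
      (pvStarts ((pvRun k rest).2.map pvRowKey)).map (· + (pvRun k rest).1.length) := by
  induction rest generalizing k with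
  | nil => simp [pvRun, pvAdj, pvStarts]
  | cons r rest ih =>
    by_cases h : pvRowKey r = k
    · subst h
      have hrun : pvRun (pvRowKey r) (r :: rest) =
          (pvMeaning r :: (pvRun (pvRowKey r) rest).1, (pvRun (pvRowKey r) rest).2) := by
        simp [pvRun]
      rw [List.map_cons, pvAdj_cons, if_neg (by simp), List.nil_append, hrun,
          ih (pvRowKey r), List.map_map]
      rfl
    · have hrun : pvRun k (r :: rest) = ([], r :: rest) := by
        simp [pvRun, h]
      rw [List.map_cons, pvAdj_cons, if_pos (by simp [h]), hrun]
      rw [List.map_cons, pvStarts_cons]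
      simp

theorem pvRun_drop (k : String) (rest : List (List String)) :
    rest.drop (pvRun k rest).1.length = (pvRun k rest).2 := by
  induction rest with
  | nil => simp [pvRun]
  | cons r rest ih =>
    by_cases h : pvRowKey r = k <;> simp [pvRun, h, ih]

theorem pvRun_take (k : String) (rest : List (List String)) :
    (rest.take (pvRun k rest).1.length).map pvMeaning = (pvRun k rest).1 := by
  induction rest with
  | nil => simp [pvRun]
  | cons r rest ih =>
    by_cases h : pvRowKey r = k <;> simp [pvRun, h, ih]

theorem getD_add_drop {α : Type} (l : List α) (c lo : Nat) (d : α) :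
    l.getD (lo + c) d = (l.drop c).getD lo d := by
  rw [List.getD_eq_getElem?_getD, List.getD_eq_getElem?_getD, List.getElem?_drop,
      Nat.add_comm c lo]

theorem run_len_le (k : String) (rest : List (List String)) :
    (pvRun k rest).1.length ≤ rest.length := by
  have h := congrArg List.length (pvRun_take k rest)
  simp only [List.length_map, List.length_take] at h
  omega

-- shifting a bound past a dropped prefix evaluates the group in the suffix
theorem pvGroupRow_shift (rows tail : List (List String)) (c lo hi : Nat)
    (hdrop : rows.drop c = tail) :
    pvGroupRow (rows.map pvRowKey) rows (lo + c, hi + c) =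
      pvGroupRow (tail.map pvRowKey) tail (lo, hi) := by
  have hm : rows.drop (lo + c) = tail.drop lo := by
    rw [← hdrop, List.drop_drop, Nat.add_comm c lo]
  have hk : (rows.map pvRowKey).getD (lo + c) "" = (tail.map pvRowKey).getD lo "" := by
    rw [getD_add_drop, ← List.map_drop, hdrop]
  have hs : hi + c - (lo + c) = hi - lo := by omega
  simp only [pvGroupRow, hm, hk, hs]

-- the first group of r :: rest is the leading run of rows keyed like r
theorem pvGroupRow_head (r : List String) (rest : List (List String)) :
    pvGroupRow ((r :: rest).map pvRowKey) (r :: rest) (0, (pvRun (pvRowKey r) rest).1.length + 1) =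
      pvFmt (pvRowKey r) (pvMeaning r) (pvRun (pvRowKey r) rest).1 := by
  have hm : (((r :: rest).drop 0).take ((pvRun (pvRowKey r) rest).1.length + 1 - 0)).map
      (fun row => PySem.List.pyGetD row 2 "") = pvMeaning r :: (pvRun (pvRowKey r) rest).1 := by
    simp only [List.drop_zero, Nat.sub_zero, List.take_succ_cons, List.map_cons]
    exact congrArg _ (pvRun_take (pvRowKey r) rest)
  by_cases h0 : (pvRun (pvRowKey r) rest).1 = []
  · simp [pvGroupRow, pvFmt, h0, pvMeaning]
  · have hlen0 : (pvRun (pvRowKey r) rest).1.length ≠ 0 :=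
      fun hh => h0 (List.eq_nil_of_length_eq_zero hh)
    simp only [pvGroupRow, hm]
    rw [if_neg (show ¬ ((pvRun (pvRowKey r) rest).1.length + 1 - 0 == 1) = true by
          simp; omega),
        pvFmt, if_neg h0]
    simp [pvMeaning]

theorem alt_eq_pvGrp_aux : ∀ (n : Nat) (rows : List (List String)), rows.length ≤ n →
    get_word_meaning_list_alt rows = pvGrp rows := by
  intro n
  induction n with
  | zero =>
    intro rows h
    rw [List.eq_nil_of_length_eq_zero (Nat.le_zero.mp h)]
    simp [get_word_meaning_list_alt, pvStarts, pvGrp]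
  | succ n ih =>
    intro rows hlen
    cases rows with
    | nil => simp [get_word_meaning_list_alt, pvStarts, pvGrp]
    | cons r rest =>
      rcases hrun : pvRun (pvRowKey r) rest with ⟨ms, tl⟩
      have hdrop : rest.drop ms.length = tl := by
        have := pvRun_drop (pvRowKey r) rest; rwa [hrun] at this
      have hle : ms.length ≤ rest.length := by
        have := run_len_le (pvRowKey r) rest; rwa [hrun] at this
      have hdropc : (r :: rest).drop (ms.length + 1) = tl := by
        rw [List.drop_succ_cons, hdrop]
      have htlen : tl.length = rest.length - ms.length := by
        rw [← hdrop, List.length_drop]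
      have hstarts : pvStarts ((r :: rest).map pvRowKey) =
          0 :: (pvStarts (tl.map pvRowKey)).map (· + (ms.length + 1)) := by
        rw [List.map_cons, pvStarts_cons, pvAdj_run, hrun, List.map_map]
        rfl
      have hhead : pvGroupRow ((r :: rest).map pvRowKey) (r :: rest) (0, ms.length + 1) =
          pvFmt (pvRowKey r) (pvMeaning r) ms := by
        have h := pvGroupRow_head r rest; rw [hrun] at h; exact h
      have hgrp : pvGrp (r :: rest) = pvFmt (pvRowKey r) (pvMeaning r) ms :: pvGrp tl := by
        rw [pvGrp]; rw [hrun]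
      cases htc : tl with
      | nil =>
        subst htc
        have hleq : ms.length = rest.length := by
          simp at htlen; omega
        have e2 : get_word_meaning_list_alt (r :: rest) =
            [pvGroupRow ((r :: rest).map pvRowKey) (r :: rest) (0, (r :: rest).length)] := by
          show ((pvStarts ((r :: rest).map pvRowKey)).zip
              ((pvStarts ((r :: rest).map pvRowKey)).tail ++ [(r :: rest).length])).map
              (pvGroupRow ((r :: rest).map pvRowKey) (r :: rest)) = _
          rw [hstarts]
          rfl
        rw [hgrp, e2, show (r :: rest).length = ms.length + 1 by simp only [List.length_cons]; omega,
            hhead]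
        simp [pvGrp]
      | cons t tl' =>
        subst htc
        obtain ⟨S', hS⟩ : ∃ S', pvStarts ((t :: tl').map pvRowKey) = 0 :: S' :=
          ⟨_, by rw [List.map_cons, pvStarts_cons]⟩
        have hnlen : (r :: rest).length = (t :: tl').length + (ms.length + 1) := by
          simp only [List.length_cons] at htlen ⊢; omega
        have e2 : get_word_meaning_list_alt (r :: rest) =
            pvGroupRow ((r :: rest).map pvRowKey) (r :: rest) (0, ms.length + 1) ::
            (((0 :: S').zip ((0 :: S').tail ++ [(t :: tl').length])).map
                (Prod.map (· + (ms.length + 1)) (· + (ms.length + 1)))).map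
              (pvGroupRow ((r :: rest).map pvRowKey) (r :: rest)) := by
          show ((pvStarts ((r :: rest).map pvRowKey)).zip
              ((pvStarts ((r :: rest).map pvRowKey)).tail ++ [(r :: rest).length])).map
              (pvGroupRow ((r :: rest).map pvRowKey) (r :: rest)) = _
          rw [hstarts, hS, ← List.zip_map]
          simp only [List.map_cons, List.map_append, List.map_nil, List.tail_cons,
            Nat.zero_add, List.cons_append, List.zip_cons_cons, hnlen]
        have hbody : ∀ b : Nat × Nat,
            (pvGroupRow ((r :: rest).map pvRowKey) (r :: rest) ∘
              Prod.map (· + (ms.length + 1)) (· + (ms.length + 1))) b =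
            pvGroupRow ((t :: tl').map pvRowKey) (t :: tl') b := by
          intro ⟨lo, hi⟩
          exact pvGroupRow_shift (r :: rest) (t :: tl') (ms.length + 1) lo hi hdropc
        have htail_len : (t :: tl').length ≤ n := by
          simp only [List.length_cons] at hlen htlen ⊢; omega
        rw [hgrp, e2, hhead, List.map_map]
        congr 1
        rw [List.map_congr_left (fun b _ => hbody b), ← ih (t :: tl') htail_len]
        show _ = ((pvStarts ((t :: tl').map pvRowKey)).zip
            ((pvStarts ((t :: tl').map pvRowKey)).tail ++ [(t :: tl').length])).map
            (pvGroupRow ((t :: tl').map pvRowKey) (t :: tl'))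
        rw [hS]

theorem alt_eq_pvGrp (rows : List (List String)) :
    get_word_meaning_list_alt rows = pvGrp rows :=
  alt_eq_pvGrp_aux rows.length rows le_rfl

-- ===== VERDICT (by name: the statement is the Claim_ definition above) =====
theorem get_word_meaning_list_spec : Claim_equal_get_word_meaning_list := by
  unfold Claim_equal_get_word_meaning_list
  intro rows _ hpre
  unfold Spec_get_word_meaning_list
  rw [A_eq_pvGrp rows hpre, alt_eq_pvGrp rows]
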